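-- pv_equiv track=rewrite | github.com/meriemhela/MicroCode | challenge1.py | spy_code_extraction
-- ===== SOURCE A (Python) =====
-- def lngst_com_subseq(first, last):
--     m, n = len(first), len(last)
--     dp = [["" for _ in range(n+1)] for _ in range(m+1)]
--
--     for i in range(1, m+1):
--         for j in range(1, n+1):
--             if first[i-1] == last[j-1]:
--                 dp[i][j] = dp[i-1][j-1] + first[i-1]
--             else:
--                 dp[i][j] = dp[i-1][j] if len(dp[i-1][j]) > len(dp[i][j-1]) else dp[i][j-1]
--
--     return dp[m][n]
--
-- def spy_code_extraction(message):
--     words = message.split()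
--     first_word = words[0]
--     last_word = words[-1]
--
--     # find Longest Com subseq
--     lcs = lngst_com_subseq(first_word, last_word)
--
--     # delete com from 1st word
--     for char in lcs:
--         first_word = first_word.replace(char, '', 1)
--
--     return first_word
-- ===== SOURCE B (Python) =====
-- def spy_code_extraction(message):
--     words = message.split()
--     first_word = words[0]
--     last_word = words[-1]
--     m, n = len(first_word), len(last_word)
--
--     # length-only LCS table (same tie-break as the string DP: on equal lengths prefer L[i][j-1])
--     L = [[0] * (n + 1) for _ in range(m + 1)]
--     for i in range(1, m + 1):
--         for j in range(1, n + 1):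
--             if first_word[i - 1] == last_word[j - 1]:
--                 L[i][j] = L[i - 1][j - 1] + 1
--             else:
--                 L[i][j] = L[i - 1][j] if L[i - 1][j] > L[i][j - 1] else L[i][j - 1]
--
--     # backtrack: collect the LCS characters (in reverse order; order is irrelevant for deletion)
--     to_del = []
--     i, j = m, n
--     while i > 0 and j > 0:
--         if first_word[i - 1] == last_word[j - 1]:
--             to_del.append(first_word[i - 1])
--             i -= 1
--             j -= 1
--         elif L[i - 1][j] > L[i][j - 1]:
--             i -= 1
--         else:
--             j -= 1
--
--     # delete, in one left-to-right scan, the first occurrences of the collected characters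
--     out = []
--     for ch in first_word:
--         if ch in to_del:
--             to_del.remove(ch)
--         else:
--             out.append(ch)
--     return ''.join(out)
-- ===== Notes on version B (the rewrite author's own statement) =====
-- stated objective: alternative
-- what changed: B replaces A's string-valued LCS table (each cell stores a whole subsequence string) by a length-only DP table with pointer backtracking that replicates A's tie-break, and replaces A's per-character str.replace passes by a single counted left-to-right deletion scan of the first word.
import Mathlib
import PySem

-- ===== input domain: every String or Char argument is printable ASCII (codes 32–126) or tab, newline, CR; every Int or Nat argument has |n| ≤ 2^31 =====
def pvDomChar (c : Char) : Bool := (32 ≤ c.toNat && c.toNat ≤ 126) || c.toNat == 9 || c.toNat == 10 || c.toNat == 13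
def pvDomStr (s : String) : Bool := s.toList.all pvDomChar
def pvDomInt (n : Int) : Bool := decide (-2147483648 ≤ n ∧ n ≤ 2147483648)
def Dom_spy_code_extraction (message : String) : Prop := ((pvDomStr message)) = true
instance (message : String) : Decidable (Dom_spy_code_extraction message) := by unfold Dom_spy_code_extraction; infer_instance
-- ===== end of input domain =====

-- B replaces A's string-valued LCS table by a length-only DP with pointer backtracking (same
-- tie-break) and a single counted deletion scan of the first word.

-- ===== PORT A =====
-- 2-D table access (Python list-of-lists read dp[i][j] / write dp[i][j] = v; indices in range here)
def pvGet2 {α : Type} (dp : List (List α)) (i j : Nat) (d : α) : α := (dp.getD i []).getD j d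
def pvSet2 {α : Type} (dp : List (List α)) (i j : Nat) (v : α) : List (List α) :=
  dp.set i ((dp.getD i []).set j v)

-- Python first_word.replace(char, '', 1) for a single character char: removes the first
-- occurrence of that character (hand port, exact; PySem.Str.replace has no count argument)
def pvRemoveFirst (w : List Char) (c : Char) : List Char :=
  match w with
  | [] => []
  | x :: xs => if x = c then xs else x :: pvRemoveFirst xs c

def lngst_com_subseq (first last : List Char) : List Char :=
  let m := first.length
  let n := last.length
  let dp0 : List (List (List Char)) := List.replicate (m+1) (List.replicate (n+1) [])
  let dp := (List.range m).foldl (fun dp i =>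
    (List.range n).foldl (fun dp j =>
      let v :=
        if first.getD i ' ' = last.getD j ' ' then
          pvGet2 dp i j [] ++ [first.getD i ' ']
        else if (pvGet2 dp i (j+1) []).length > (pvGet2 dp (i+1) j []).length then
          pvGet2 dp i (j+1) []
        else
          pvGet2 dp (i+1) j []
      pvSet2 dp (i+1) (j+1) v) dp) dp0
  pvGet2 dp m n []

def spy_code_extraction (message : String) : String :=
  let words := PySem.Str.split₀ message
  let first_word := (words.headD "").toList   -- words[0]; Pre_ excludes words = [] (IndexError)
  let last_word := (words.getLastD "").toList -- words[-1]
  let lcs := lngst_com_subseq first_word last_word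
  let fw := lcs.foldl (fun w c => pvRemoveFirst w c) first_word
  String.ofList fw

-- ===== PORT B =====
-- backtracking over the length table, replicating the tie-break (the i,j walk from (m,n))
def pvBacktrack (first last : List Char) (L : List (List Nat)) : Nat → Nat → List Char
  | 0, _ => []
  | _+1, 0 => []
  | i+1, j+1 =>
    if first.getD i ' ' = last.getD j ' ' then
      first.getD i ' ' :: pvBacktrack first last L i j
    else if pvGet2 L i (j+1) 0 > pvGet2 L (i+1) j 0 then
      pvBacktrack first last L i (j+1)
    else
      pvBacktrack first last L (i+1) j
termination_by i j => (i, j)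

-- one left-to-right scan of first_word deleting the collected characters (Python's
-- `if ch in to_del: to_del.remove(ch) else: out.append(ch)`)
def pvScanDel : List Char → List Char → List Char
  | [], _ => []
  | x :: xs, cs => if x ∈ cs then pvScanDel xs (cs.erase x) else x :: pvScanDel xs cs

def spy_code_extraction_alt (message : String) : String :=
  let words := PySem.Str.split₀ message
  let first_word := (words.headD "").toList   -- words[0]; Pre_ excludes words = [] (IndexError)
  let last_word := (words.getLastD "").toList -- words[-1]
  let m := first_word.length
  let n := last_word.length
  let L0 : List (List Nat) := List.replicate (m+1) (List.replicate (n+1) 0)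
  let L := (List.range m).foldl (fun L i =>
    (List.range n).foldl (fun L j =>
      let v :=
        if first_word.getD i ' ' = last_word.getD j ' ' then
          pvGet2 L i j 0 + 1
        else if pvGet2 L i (j+1) 0 > pvGet2 L (i+1) j 0 then
          pvGet2 L i (j+1) 0
        else
          pvGet2 L (i+1) j 0
      pvSet2 L (i+1) (j+1) v) L) L0
  let toDel := pvBacktrack first_word last_word L m n
  String.ofList (pvScanDel first_word toDel)

-- ===== PRECONDITION & SPEC =====
-- Pre_ excludes exactly the messages with no words (empty / all whitespace), on which the
-- Python A raises IndexError at words[0] (B's Python raises there too).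
def Pre_spy_code_extraction (message : String) : Prop := PySem.Str.split₀ message ≠ []
instance (message : String) : Decidable (Pre_spy_code_extraction message) := by
  unfold Pre_spy_code_extraction; infer_instance

def pvWitness_spy_code_extraction : String := "abcd bd"

def Spec_spy_code_extraction (message : String) (out : String) : Prop := out = spy_code_extraction_alt message
instance (message : String) (out : String) : Decidable (Spec_spy_code_extraction message out) := by
  unfold Spec_spy_code_extraction; infer_instance

-- ===== CLAIM (what is proved, stated in full; the proofs are below) =====
def Claim_equal_spy_code_extraction : Prop := ∀ (message : String), Dom_spy_code_extraction message → Pre_spy_code_extraction message → Spec_spy_code_extraction message (spy_code_extraction message)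

-- ===== LEMMAS AND PROOFS =====

-- the recurrence both DP tables compute, cell by cell
def pvRec {α : Type} (e : α) (cell : Nat → Nat → α → α → α → α) : Nat → Nat → α
  | 0, _ => e
  | _+1, 0 => e
  | i+1, j+1 => cell i j (pvRec e cell i j) (pvRec e cell i (j+1)) (pvRec e cell (i+1) j)
termination_by i j => (i, j)

-- A's cell (string-valued) and B's cell (length-valued)
def pvCellA (f l : List Char) : Nat → Nat → List Char → List Char → List Char → List Char :=
  fun i j a b c =>
    if f.getD i ' ' = l.getD j ' ' then a ++ [f.getD i ' ']
    else if b.length > c.length then b else c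

def pvCellB (f l : List Char) : Nat → Nat → Nat → Nat → Nat → Nat :=
  fun i j a b c =>
    if f.getD i ' ' = l.getD j ' ' then a + 1
    else if b > c then b else c

-- the table state after the first k rows are fully processed and row k+1 through column kj
def pvIdeal {α : Type} (e : α) (cell : Nat → Nat → α → α → α → α) (m n k kj : Nat) :
    List (List α) :=
  (List.range (m+1)).map (fun r => (List.range (n+1)).map (fun c =>
    if r ≤ k ∨ (r = k+1 ∧ c ≤ kj) then pvRec e cell r c else e))

lemma pvGet2_ideal {α : Type} (e : α) (cell) (m n k kj r c : Nat) (hr : r ≤ m) (hc : c ≤ n) :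
    pvGet2 (pvIdeal e cell m n k kj) r c e =
      if r ≤ k ∨ (r = k+1 ∧ c ≤ kj) then pvRec e cell r c else e := by
  unfold pvGet2 pvIdeal
  rw [PySem.List.getD_map_range _ _ _ _ (by omega), PySem.List.getD_map_range _ _ _ _ (by omega)]

lemma pvSet2_ideal {α : Type} (e : α) (cell) (m n k kj : Nat) (hk : k + 1 ≤ m) :
    pvSet2 (pvIdeal e cell m n k kj) (k+1) (kj+1) (pvRec e cell (k+1) (kj+1)) =
      pvIdeal e cell m n k (kj+1) := by
  unfold pvSet2 pvIdeal
  rw [PySem.List.getD_map_range _ _ _ _ (by omega)]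
  apply List.ext_getElem
  · simp
  intro r h1 h2
  rw [List.getElem_set]
  simp only [List.length_set, List.length_map, List.length_range] at h1 h2
  by_cases hrk : k + 1 = r
  · rw [if_pos hrk]
    subst hrk
    rw [List.getElem_map, List.getElem_range]
    apply List.ext_getElem
    · simp
    intro c hc1 hc2
    simp only [List.length_set, List.length_map, List.length_range] at hc1 hc2
    simp only [List.getElem_set, List.getElem_map, List.getElem_range]
    by_cases hck : kj + 1 = c
    · subst hck
      rw [if_pos rfl, if_pos (Or.inr ⟨trivial, Nat.le_refl _⟩)]
    · rw [if_neg hck]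
      exact if_congr (by simp only [true_and]; omega) rfl rfl
  · rw [if_neg hrk]
    simp only [List.getElem_map, List.getElem_range]
    apply List.map_congr_left
    intro c hc
    exact if_congr (by omega) rfl rfl

lemma pvIdeal_init {α : Type} (e : α) (cell) (m n : Nat) :
    (List.replicate (m+1) (List.replicate (n+1) e) : List (List α)) = pvIdeal e cell m n 0 0 := by
  unfold pvIdeal
  apply List.ext_getElem
  · simp
  intro r h1 h2
  simp only [List.getElem_replicate, List.getElem_map, List.getElem_range]
  apply List.ext_getElem
  · simp
  intro c hc1 hc2
  simp only [List.getElem_replicate, List.getElem_map, List.getElem_range]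
  rcases r with _ | r
  · simp [pvRec]
  · rcases c with _ | c
    · split_ifs <;> simp [pvRec]
    · rw [if_neg (by omega)]

lemma pvIdeal_row_done {α : Type} (e : α) (cell) (m n k : Nat) :
    pvIdeal e cell m n k n = pvIdeal e cell m n (k+1) 0 := by
  unfold pvIdeal
  apply List.map_congr_left; intro r hr
  apply List.map_congr_left; intro c hc
  simp only [List.mem_range] at hr hc
  by_cases h1 : r ≤ k
  · rw [if_pos (Or.inl h1), if_pos (Or.inl (by omega))]
  · by_cases h2 : r = k + 1
    · rw [if_pos (Or.inr ⟨h2, by omega⟩), if_pos (Or.inl (by omega))]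
    · by_cases h3 : r = k + 2
      · rw [if_neg (by omega)]
        subst h3
        rcases c with _ | c
        · rw [if_pos (Or.inr ⟨rfl, Nat.le_refl _⟩)]
          simp [pvRec]
        · rw [if_neg (by omega)]
      · rw [if_neg (by omega), if_neg (by omega)]

lemma pvInner {α : Type} (e : α) (cell) (m n k : Nat) (hk : k + 1 ≤ m) :
    ∀ jj, jj ≤ n →
      (List.range jj).foldl (fun dp j =>
        pvSet2 dp (k+1) (j+1)
          (cell k j (pvGet2 dp k j e) (pvGet2 dp k (j+1) e) (pvGet2 dp (k+1) j e)))
        (pvIdeal e cell m n k 0) = pvIdeal e cell m n k jj := by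
  intro jj
  induction jj with
  | zero => intro _; rfl
  | succ jj ih =>
    intro hjj
    rw [List.range_succ, List.foldl_append, ih (by omega)]
    simp only [List.foldl_cons, List.foldl_nil]
    rw [pvGet2_ideal e cell m n k jj k jj (by omega) (by omega),
        pvGet2_ideal e cell m n k jj k (jj+1) (by omega) (by omega),
        pvGet2_ideal e cell m n k jj (k+1) jj (by omega) (by omega),
        if_pos (Or.inl (Nat.le_refl k)), if_pos (Or.inl (Nat.le_refl k)),
        if_pos (Or.inr ⟨rfl, Nat.le_refl jj⟩)]
    have hcell : cell k jj (pvRec e cell k jj) (pvRec e cell k (jj+1)) (pvRec e cell (k+1) jj)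
        = pvRec e cell (k+1) (jj+1) := by rw [pvRec]
    rw [hcell, pvSet2_ideal e cell m n k jj hk]

lemma pvTab_eq {α : Type} (e : α) (cell) (m n : Nat) :
    ∀ kk, kk ≤ m →
      (List.range kk).foldl (fun dp i =>
        (List.range n).foldl (fun dp j =>
          pvSet2 dp (i+1) (j+1)
            (cell i j (pvGet2 dp i j e) (pvGet2 dp i (j+1) e) (pvGet2 dp (i+1) j e))) dp)
        (List.replicate (m+1) (List.replicate (n+1) e)) = pvIdeal e cell m n kk 0 := by
  intro kk
  induction kk with
  | zero => intro _; exact pvIdeal_init e cell m n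
  | succ kk ih =>
    intro hkk
    rw [List.range_succ, List.foldl_append, ih (by omega)]
    simp only [List.foldl_cons, List.foldl_nil]
    rw [pvInner e cell m n kk hkk n (Nat.le_refl n), pvIdeal_row_done]

lemma pvRecA_succ (f l : List Char) (i j : Nat) :
    pvRec [] (pvCellA f l) (i+1) (j+1) =
      if f.getD i ' ' = l.getD j ' ' then pvRec [] (pvCellA f l) i j ++ [f.getD i ' ']
      else if (pvRec [] (pvCellA f l) i (j+1)).length > (pvRec [] (pvCellA f l) (i+1) j).length
        then pvRec [] (pvCellA f l) i (j+1)
        else pvRec [] (pvCellA f l) (i+1) j := by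
  rw [pvRec]; rfl

lemma pvRecB_succ (f l : List Char) (i j : Nat) :
    pvRec 0 (pvCellB f l) (i+1) (j+1) =
      if f.getD i ' ' = l.getD j ' ' then pvRec 0 (pvCellB f l) i j + 1
      else if pvRec 0 (pvCellB f l) i (j+1) > pvRec 0 (pvCellB f l) (i+1) j
        then pvRec 0 (pvCellB f l) i (j+1)
        else pvRec 0 (pvCellB f l) (i+1) j := by
  rw [pvRec]; rfl

lemma pvRec_zero_left {α : Type} (e : α) (cell) (j : Nat) : pvRec e cell 0 j = e := by
  rw [pvRec]

lemma pvRec_zero_right {α : Type} (e : α) (cell) (i : Nat) : pvRec e cell i 0 = e := by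
  cases i <;> rw [pvRec]

-- the length of A's string cell is B's numeric cell
lemma pvLen_rec (f l : List Char) :
    ∀ i j, (pvRec [] (pvCellA f l) i j).length = pvRec 0 (pvCellB f l) i j := by
  intro i
  induction i with
  | zero => intro j; rw [pvRec_zero_left, pvRec_zero_left]; rfl
  | succ i ih =>
    intro j
    induction j with
    | zero => rw [pvRec_zero_right, pvRec_zero_right]; rfl
    | succ j ihj =>
      rw [pvRecA_succ, pvRecB_succ]
      by_cases h : f.getD i ' ' = l.getD j ' '
      · rw [if_pos h, if_pos h]
        simp [ih]
      · rw [if_neg h, if_neg h, apply_ite List.length, ih, ihj]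

-- backtracking over a correct length table returns the reversed LCS string of A
lemma pvBacktrack_eq (f l : List Char) (L : List (List Nat)) (m n : Nat)
    (hL : ∀ r c, r ≤ m → c ≤ n → pvGet2 L r c 0 = pvRec 0 (pvCellB f l) r c) :
    ∀ i, i ≤ m → ∀ j, j ≤ n →
      pvBacktrack f l L i j = (pvRec [] (pvCellA f l) i j).reverse := by
  intro i
  induction i with
  | zero => intro _ j _; rw [pvBacktrack, pvRec_zero_left]; rfl
  | succ i ih =>
    intro hi j
    induction j with
    | zero => intro _; rw [pvBacktrack, pvRec_zero_right]; rfl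
    | succ j ihj =>
      intro hj
      rw [pvBacktrack, pvRecA_succ]
      by_cases h : f.getD i ' ' = l.getD j ' '
      · rw [if_pos h, if_pos h, ih (by omega) j (by omega)]
        simp
      · rw [if_neg h, if_neg h,
            hL i (j+1) (by omega) (by omega), hL (i+1) j (by omega) (by omega),
            ← pvLen_rec, ← pvLen_rec]
        by_cases h2 : (pvRec [] (pvCellA f l) i (j+1)).length > (pvRec [] (pvCellA f l) (i+1) j).length
        · rw [if_pos h2, if_pos h2, ih (by omega) (j+1) (by omega)]
        · rw [if_neg h2, if_neg h2, ihj (by omega)]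

-- deletion: folding first-occurrence removal over cs = one counted scan of the word
lemma pvFold_rf_nil (cs : List Char) : cs.foldl pvRemoveFirst [] = [] := by
  induction cs with
  | nil => rfl
  | cons c cs ih => simpa [pvRemoveFirst] using ih

lemma pvFold_rf_not_mem (x : Char) (cs : List Char) (hx : x ∉ cs) :
    ∀ xs, cs.foldl pvRemoveFirst (x :: xs) = x :: cs.foldl pvRemoveFirst xs := by
  induction cs with
  | nil => intro xs; rfl
  | cons c cs ih =>
    intro xs
    have hcx : ¬ x = c := fun h => hx (h ▸ List.mem_cons_self)
    simp only [List.foldl_cons]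
    rw [show pvRemoveFirst (x :: xs) c = x :: pvRemoveFirst xs c by
          rw [pvRemoveFirst]; exact if_neg hcx]
    exact ih (fun h => hx (List.mem_cons_of_mem _ h)) _

lemma pvFold_rf_mem (x : Char) (cs : List Char) (hx : x ∈ cs) :
    ∀ xs, cs.foldl pvRemoveFirst (x :: xs) = (cs.erase x).foldl pvRemoveFirst xs := by
  induction cs with
  | nil => cases hx
  | cons c cs ih =>
    intro xs
    by_cases hcx : c = x
    · subst hcx
      rw [List.erase_cons_head]
      simp [pvRemoveFirst]
    · have hx' : x ∈ cs := by
        rcases List.mem_cons.mp hx with h | h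
        · exact absurd h.symm hcx
        · exact h
      rw [List.erase_cons_tail (by simp [hcx])]
      simp only [List.foldl_cons]
      rw [show pvRemoveFirst (x :: xs) c = x :: pvRemoveFirst xs c by
            rw [pvRemoveFirst]; exact if_neg (fun h => hcx h.symm)]
      exact ih hx' _

lemma pvFold_rf_eq_scan : ∀ (xs cs : List Char), cs.foldl pvRemoveFirst xs = pvScanDel xs cs := by
  intro xs
  induction xs with
  | nil => intro cs; rw [pvFold_rf_nil]; rfl
  | cons x xs ih =>
    intro cs
    by_cases hx : x ∈ cs
    · rw [pvFold_rf_mem x cs hx, ih, pvScanDel, if_pos hx]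
    · rw [pvFold_rf_not_mem x cs hx, ih, pvScanDel, if_neg hx]

lemma pvScanDel_perm (xs : List Char) : ∀ {cs cs' : List Char}, cs.Perm cs' →
    pvScanDel xs cs = pvScanDel xs cs' := by
  induction xs with
  | nil => intro cs cs' _; rfl
  | cons x xs ih =>
    intro cs cs' h
    rw [pvScanDel, pvScanDel]
    by_cases hx : x ∈ cs
    · rw [if_pos hx, if_pos (h.mem_iff.mp hx), ih (h.erase x)]
    · rw [if_neg hx, if_neg (fun hc => hx (h.mem_iff.mpr hc)), ih h]

-- the two table-building folds, named so pvTab_eq applies (definitionally equal to the ports' folds)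
def pvATab (f l : List Char) : List (List (List Char)) :=
  (List.range f.length).foldl (fun dp i =>
    (List.range l.length).foldl (fun dp j =>
      pvSet2 dp (i+1) (j+1)
        (pvCellA f l i j (pvGet2 dp i j []) (pvGet2 dp i (j+1) []) (pvGet2 dp (i+1) j []))) dp)
    (List.replicate (f.length+1) (List.replicate (l.length+1) []))

def pvLTab (f l : List Char) : List (List Nat) :=
  (List.range f.length).foldl (fun L i =>
    (List.range l.length).foldl (fun L j =>
      pvSet2 L (i+1) (j+1)
        (pvCellB f l i j (pvGet2 L i j 0) (pvGet2 L i (j+1) 0) (pvGet2 L (i+1) j 0))) L)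
    (List.replicate (f.length+1) (List.replicate (l.length+1) 0))

lemma pvLTab_get (f l : List Char) (r c : Nat) (hr : r ≤ f.length) (hc : c ≤ l.length) :
    pvGet2 (pvLTab f l) r c 0 = pvRec 0 (pvCellB f l) r c := by
  unfold pvLTab
  rw [pvTab_eq 0 (pvCellB f l) f.length l.length f.length (Nat.le_refl _),
      pvGet2_ideal 0 (pvCellB f l) f.length l.length f.length 0 r c hr hc,
      if_pos (Or.inl hr)]

lemma pvA_eq (f l : List Char) :
    lngst_com_subseq f l = pvRec [] (pvCellA f l) f.length l.length := by
  have h0 : lngst_com_subseq f l = pvGet2 (pvATab f l) f.length l.length [] := rfl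
  rw [h0]
  unfold pvATab
  rw [pvTab_eq [] (pvCellA f l) f.length l.length f.length (Nat.le_refl _),
      pvGet2_ideal [] (pvCellA f l) f.length l.length f.length 0 _ _ (Nat.le_refl _) (Nat.le_refl _),
      if_pos (Or.inl (Nat.le_refl _))]

-- the whole body of both ports, on the shared first/last words
lemma pvCore (f l : List Char) :
    String.ofList ((lngst_com_subseq f l).foldl pvRemoveFirst f) =
      String.ofList (pvScanDel f (pvBacktrack f l (pvLTab f l) f.length l.length)) := by
  have hBt := pvBacktrack_eq f l (pvLTab f l) f.length l.length
      (fun r c hr hc => pvLTab_get f l r c hr hc) f.length (Nat.le_refl _) l.length (Nat.le_refl _)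
  rw [hBt, pvFold_rf_eq_scan, pvA_eq,
      pvScanDel_perm f (List.reverse_perm (pvRec [] (pvCellA f l) f.length l.length)).symm]

-- ===== VERDICT (by name: the statement is the Claim_ definition above) =====
theorem spy_code_extraction_spec : Claim_equal_spy_code_extraction := by
  intro message _ _
  show spy_code_extraction message = spy_code_extraction_alt message
  exact pvCore (((PySem.Str.split₀ message).headD "").toList)
    (((PySem.Str.split₀ message).getLastD "").toList)
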